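-- pv_equiv track=rewrite | github.com/ArturoGonzalez1989/Football_Predictions | betfair_scraper/dashboard/backend/utils/csv_reader.py | _calculate_match_gaps
-- ===== SOURCE A (Python) =====
-- def _calculate_match_gaps(rows: list[dict]) -> int:
--     """Calculate number of missing minutes in a match."""
--     minutes_captured = set()
--     for row in rows:
--         m = row.get("minuto", "")
--         if m:
--             try:
--                 minutes_captured.add(int(m.replace("'", "").strip()))
--             except ValueError:
--                 pass
--
--     if minutes_captured:
--         max_min = max(minutes_captured)
--         all_minutes = set(range(1, max_min + 1))
--         gaps = all_minutes - minutes_captured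
--         return len(gaps)
--     return 0
-- ===== SOURCE B (Python) =====
-- def _parse_minute(m):
--     """Parse a captured minute cell, or None if empty/unparseable."""
--     if not m:
--         return None
--     try:
--         return int(m.replace("'", "").strip())
--     except ValueError:
--         return None
--
--
-- def _calculate_match_gaps(rows: list[dict]) -> int:
--     """Calculate number of missing minutes in a match.
--
--     Instead of materialising the full range of minutes and a set
--     difference, count the distinct captured minutes that fall inside
--     [1, max_min] and subtract from max_min.
--     """
--     seen = {v for v in (_parse_minute(row.get("minuto", "")) for row in rows)
--             if v is not None}
--     if not seen:
--         return 0
--     max_min = max(seen)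
--     in_range = sum(1 for v in seen if 1 <= v <= max_min)
--     return max(max_min - in_range, 0)
-- ===== Notes on version B (the rewrite author's own statement) =====
-- stated objective: alternative
-- what changed: Instead of materialising set(range(1, max_min+1)) and taking a set difference, B counts the distinct captured minutes lying in [1, max_min] and returns max_min minus that count (clamped at 0); it avoids the O(max_min) range set but is not measurably faster on the benchmark inputs.
import Mathlib
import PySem

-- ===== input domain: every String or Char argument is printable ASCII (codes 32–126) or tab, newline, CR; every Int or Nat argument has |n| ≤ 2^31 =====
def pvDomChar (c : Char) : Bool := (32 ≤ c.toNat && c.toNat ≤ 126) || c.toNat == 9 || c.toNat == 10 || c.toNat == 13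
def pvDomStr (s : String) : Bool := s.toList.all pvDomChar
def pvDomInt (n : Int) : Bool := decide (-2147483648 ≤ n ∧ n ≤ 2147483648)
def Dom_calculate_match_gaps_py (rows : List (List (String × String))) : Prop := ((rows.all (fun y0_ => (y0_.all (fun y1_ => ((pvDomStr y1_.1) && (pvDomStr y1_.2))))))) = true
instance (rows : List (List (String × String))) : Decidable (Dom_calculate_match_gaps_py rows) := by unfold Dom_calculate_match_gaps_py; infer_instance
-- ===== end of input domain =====

-- B replaces A's materialised range-set and set difference by a single count of the
-- distinct captured minutes lying in [1, max_min] (objective: alternative algorithm).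

-- ===== PORT A =====
-- A's loop building the set minutes_captured
def capturedMinutes (rows : List (List (String × String))) : PySem.Set Int :=
  rows.foldl (fun s row =>
    let m := (row.lookup "minuto").getD ""
    if m ≠ "" then
      match PySem.Int.ofStr? (PySem.Str.strip (PySem.Str.replace m "'" "")) with
      | some v => s.add v
      | none => s
    else s) PySem.Set.empty

def calculate_match_gaps_py (rows : List (List (String × String))) : Int :=
  match PySem.List.max? (capturedMinutes rows) (fun x => x) with
  | some max_min =>
      PySem.Set.len
        (PySem.Set.diff (PySem.Set.ofList (PySem.List.pyRange 1 (max_min + 1) 1))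
          (capturedMinutes rows))
  | none => 0

-- ===== PORT B =====
def parse_minute_alt (m : String) : Option Int :=
  if m = "" then none
  else PySem.Int.ofStr? (PySem.Str.strip (PySem.Str.replace m "'" ""))

-- the set comprehension 'seen'
def seenMinutes_alt (rows : List (List (String × String))) : PySem.Set Int :=
  PySem.Set.ofList (rows.filterMap (fun row => parse_minute_alt ((row.lookup "minuto").getD "")))

def calculate_match_gaps_py_alt (rows : List (List (String × String))) : Int :=
  match PySem.List.max? (seenMinutes_alt rows) (fun x => x) with
  | some max_min =>
      max (max_min - ((seenMinutes_alt rows).countP (fun v => decide (1 ≤ v ∧ v ≤ max_min)) : Int)) 0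
  | none => 0

-- ===== PRECONDITION & SPEC =====
def Spec_calculate_match_gaps_py (rows : List (List (String × String))) (out : Int) : Prop := out = calculate_match_gaps_py_alt rows
instance (rows : List (List (String × String))) (out : Int) : Decidable (Spec_calculate_match_gaps_py rows out) := by unfold Spec_calculate_match_gaps_py; infer_instance

-- ===== CLAIM (what is proved, stated in full; the proofs are below) =====
def Claim_equal_calculate_match_gaps_py : Prop := ∀ (rows : List (List (String × String))), Dom_calculate_match_gaps_py rows → Spec_calculate_match_gaps_py rows (calculate_match_gaps_py rows)

-- ===== LEMMAS AND PROOFS =====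

-- both programs collect the same set of parsed minutes
theorem capturedMinutes_fold (rows : List (List (String × String))) (s : PySem.Set Int) :
    rows.foldl (fun s row =>
      let m := (row.lookup "minuto").getD ""
      if m ≠ "" then
        match PySem.Int.ofStr? (PySem.Str.strip (PySem.Str.replace m "'" "")) with
        | some v => s.add v
        | none => s
      else s) s
    = (rows.filterMap (fun row => parse_minute_alt ((row.lookup "minuto").getD ""))).foldl PySem.Set.add s := by
  induction rows generalizing s with
  | nil => rfl
  | cons r t ih =>
      simp only [List.foldl_cons, List.filterMap_cons]
      have hstep : (let m := (r.lookup "minuto").getD ""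
        if m ≠ "" then
          match PySem.Int.ofStr? (PySem.Str.strip (PySem.Str.replace m "'" "")) with
          | some v => s.add v
          | none => s
        else s)
        = match parse_minute_alt ((r.lookup "minuto").getD "") with
          | some v => s.add v
          | none => s := by
        simp only [parse_minute_alt]
        by_cases h : (r.lookup "minuto").getD "" = "" <;> simp [h]
      rw [hstep]
      cases parse_minute_alt ((r.lookup "minuto").getD "") with
      | none => exact ih s
      | some v => exact ih (s.add v)

theorem capturedMinutes_eq (rows : List (List (String × String))) :
    capturedMinutes rows = seenMinutes_alt rows := by
  rw [capturedMinutes, seenMinutes_alt, PySem.Set.ofList_eq_foldl, capturedMinutes_fold]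
  rfl

-- counting the gaps in [1, max_min] directly equals A's range-set difference
theorem gaps_count (L : List Int) (hL : L.Nodup) (M : Int) :
    PySem.Set.len (PySem.Set.diff (PySem.Set.ofList (PySem.List.pyRange 1 (M + 1) 1)) L)
      = max (M - (L.countP (fun v => decide (1 ≤ v ∧ v ≤ M)) : Int)) 0 := by
  rcases le_or_gt M 0 with hM | hM
  · have hcnt0 : L.countP (fun v => decide (1 ≤ v ∧ v ≤ M)) = 0 := by
      refine List.countP_eq_zero.mpr ?_
      intro v _
      simp only [decide_eq_true_eq]
      omega
    have hR : PySem.List.pyRange 1 (M + 1) 1 = [] := by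
      rw [PySem.List.pyRange_of_pos 1 (M + 1) (by norm_num), if_neg (by omega)]
      simp
    rw [hR, hcnt0]
    have h0 : PySem.Set.len (PySem.Set.diff (PySem.Set.ofList ([] : List Int)) L) = 0 := by
      simp [PySem.Set.ofList, PySem.Set.empty, PySem.Set.diff, PySem.Set.len]
    rw [h0, max_eq_right (by omega)]
  · have hn := PySem.List.pyRange_of_pos 1 (M + 1) (s := 1) (by norm_num)
    rw [if_pos (by omega)] at hn
    have hidx : ((M + 1 - 1 + 1 - 1) / 1).toNat = M.toNat := by norm_num
    rw [hidx] at hn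
    have hnodR : (PySem.List.pyRange 1 (M + 1) 1).Nodup := by
      rw [hn]
      refine List.Nodup.map ?_ List.nodup_range
      intro a b h
      simp only at h
      omega
    have hlenR : (PySem.List.pyRange 1 (M + 1) 1).length = M.toNat := by rw [hn]; simp
    have hmemR : ∀ x : Int, x ∈ PySem.List.pyRange 1 (M + 1) 1 ↔ 1 ≤ x ∧ x ≤ M := by
      intro x
      rw [PySem.List.mem_pyRange_one]
      omega
    rw [PySem.Set.ofList_eq_self_of_nodup _ hnodR]
    have hkey : ((PySem.List.pyRange 1 (M + 1) 1).filter (fun x => PySem.Set.contains L x)).length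
        = (L.filter (fun v => decide (1 ≤ v ∧ v ≤ M))).length := by
      refine List.Perm.length_eq ?_
      refine (List.perm_ext_iff_of_nodup (hnodR.filter _) (hL.filter _)).mpr ?_
      intro x
      simp only [List.mem_filter, PySem.Set.contains, List.contains_iff_mem,
        decide_eq_true_eq, hmemR]
      tauto
    have hsum : (PySem.List.pyRange 1 (M + 1) 1).length
        = ((PySem.List.pyRange 1 (M + 1) 1).filter (fun x => PySem.Set.contains L x)).length
        + ((PySem.List.pyRange 1 (M + 1) 1).filter (fun x => !PySem.Set.contains L x)).length :=
      List.length_eq_length_filter_add _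
    simp only [PySem.Set.diff, PySem.Set.len, List.countP_eq_length_filter]
    rw [max_eq_left (by omega)]
    omega

-- ===== VERDICT (by name: the statement is the Claim_ definition above) =====
theorem calculate_match_gaps_py_spec : Claim_equal_calculate_match_gaps_py := by
  intro rows _
  unfold Spec_calculate_match_gaps_py calculate_match_gaps_py calculate_match_gaps_py_alt
  rw [capturedMinutes_eq]
  cases hm : PySem.List.max? (seenMinutes_alt rows) (fun x => x) with
  | none => rfl
  | some max_min =>
      simpa using gaps_count (seenMinutes_alt rows) (PySem.Set.nodup_ofList _) max_min
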